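-- pv_equiv track=rewrite | github.com/codelinishard/zellesbookexercises | Chapter11/Ex 10.py | algoProcess
-- ===== SOURCE A (Python) =====
-- def algoProcess(x):
--     val = 0
--     reducedList = []
--     primelist = []
--     while len(x)>0: #loop ends after final number is checked
--         i = x[0]
--         primelist.append(i)
--         reducedList = checkOnePrime(x,i)
--         x = reducedList.copy()
--
--
--     return primelist
--
-- def checkOnePrime(x,prime):
--     reducedList = []
--     for y in range(len(x)):
--         if x[y] % prime != 0:
--             reducedList.append(x[y])
--     return reducedList
-- ===== SOURCE B (Python) =====
-- def algoProcess(x):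
--     # Single pass with an accumulator: keep v iff it is not a multiple of
--     # any previously kept element (same result as repeatedly re-filtering).
--     kept = []
--     for v in x:
--         if all(v % p != 0 for p in kept):
--             kept.append(v)
--     return kept
-- ===== Notes on version B (the rewrite author's own statement) =====
-- stated objective: simpler
-- what changed: One left-to-right pass testing each element against the accumulated kept list, instead of A's multi-pass loop that rebuilds and re-copies the whole remaining list once per kept element.
import Mathlib
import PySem

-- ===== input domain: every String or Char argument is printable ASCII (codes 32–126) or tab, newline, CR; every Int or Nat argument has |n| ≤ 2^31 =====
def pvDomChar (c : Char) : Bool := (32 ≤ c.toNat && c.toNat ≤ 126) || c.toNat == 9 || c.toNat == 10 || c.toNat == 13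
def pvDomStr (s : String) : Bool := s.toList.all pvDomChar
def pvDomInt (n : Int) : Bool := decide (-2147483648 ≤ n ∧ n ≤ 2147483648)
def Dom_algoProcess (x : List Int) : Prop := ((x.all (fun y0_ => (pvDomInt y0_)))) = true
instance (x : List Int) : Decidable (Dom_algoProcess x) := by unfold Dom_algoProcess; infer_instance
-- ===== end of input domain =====

-- B replaces A's multi-pass rebuild-and-copy loop by one accumulator pass (objective: simpler).

-- ===== PORT A =====
-- helper: checkOnePrime(x, prime) — index loop appending x[y] when x[y] % prime != 0
def checkOnePrime (x : List Int) (prime : Int) : List Int :=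
  (PySem.List.pyRange 0 x.length 1).foldl
    (fun acc y =>
      if PySem.Int.mod (PySem.List.pyGetD x y 0) prime ≠ 0
      then acc ++ [PySem.List.pyGetD x y 0] else acc) []

-- termination helper for the while loop: each round drops the head (head % head == 0)
theorem checkOnePrime_eq_filter (x : List Int) (p : Int) :
    checkOnePrime x p = x.filter (fun v => PySem.Int.mod v p ≠ 0) := by
  unfold checkOnePrime
  rw [PySem.List.foldl_pyRange_zero_pyGetD' x 0
    (fun acc v => if PySem.Int.mod v p ≠ 0 then acc ++ [v] else acc) []]
  induction x using List.reverseRecOn with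
  | nil => simp
  | append_singleton xs v ih =>
    rw [List.foldl_append, List.filter_append, ih]
    by_cases h : PySem.Int.mod v p ≠ 0 <;> simp [h]

theorem checkOnePrime_head_lt (i : Int) (rest : List Int) :
    (checkOnePrime (i :: rest) i).length < (i :: rest).length := by
  rw [checkOnePrime_eq_filter]
  have hmod : PySem.Int.mod i i = 0 := by simp [PySem.Int.mod]
  have h1 : (i :: rest).filter (fun v => decide (PySem.Int.mod v i ≠ 0))
      = rest.filter (fun v => decide (PySem.Int.mod v i ≠ 0)) := by
    rw [List.filter_cons]
    simp [hmod]
  rw [h1]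
  exact Nat.lt_succ_of_le (List.length_filter_le _ rest)

-- while len(x) > 0: i = x[0]; primelist.append(i); x = checkOnePrime(x, i)
def algoProcessLoop (x : List Int) (primelist : List Int) : List Int :=
  match x with
  | [] => primelist
  | i :: rest => algoProcessLoop (checkOnePrime (i :: rest) i) (primelist ++ [i])
termination_by x.length
decreasing_by exact checkOnePrime_head_lt i rest

def algoProcess (x : List Int) : List Int := algoProcessLoop x []

-- ===== PORT B =====
def algoProcess_alt (x : List Int) : List Int :=
  x.foldl
    (fun kept v =>
      if kept.all (fun p => PySem.Int.mod v p ≠ 0) then kept ++ [v] else kept) []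

-- ===== PRECONDITION & SPEC =====
-- Pre_ excludes exactly the inputs whose FIRST element is 0: there Python A raises
-- ZeroDivisionError (x[0] % 0) and returns no value.
def Pre_algoProcess (x : List Int) : Prop := x.head? ≠ some 0
instance (x : List Int) : Decidable (Pre_algoProcess x) := by unfold Pre_algoProcess; infer_instance
def pvWitness_algoProcess : List Int := [2, 3, 4, 5, 6, 7]

def Spec_algoProcess (x : List Int) (out : List Int) : Prop := out = algoProcess_alt x
instance (x : List Int) (out : List Int) : Decidable (Spec_algoProcess x out) := by unfold Spec_algoProcess; infer_instance

-- ===== CLAIM (what is proved, stated in full; the proofs are below) =====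
def Claim_equal_algoProcess : Prop := ∀ (x : List Int), Dom_algoProcess x → Pre_algoProcess x → Spec_algoProcess x (algoProcess x)


-- ===== LEMMAS AND PROOFS =====

-- reference sieve: both ports reduce to this
def sieve : List Int → List Int
  | [] => []
  | i :: rest => i :: sieve (rest.filter (fun v => PySem.Int.mod v i ≠ 0))
termination_by x => x.length
decreasing_by
  simpa using Nat.lt_succ_of_le (le_trans (List.length_filter_le _ rest.attach) (by simp))

theorem algoProcessLoop_eq (x : List Int) (acc : List Int) :
    algoProcessLoop x acc = acc ++ sieve x := by
  induction x, acc using algoProcessLoop.induct with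
  | case1 acc => simp [algoProcessLoop, sieve]
  | case2 acc i rest ih =>
    rw [algoProcessLoop, sieve]
    have hmod : PySem.Int.mod i i = 0 := by simp [PySem.Int.mod]
    have hc : checkOnePrime (i :: rest) i
        = rest.filter (fun v => PySem.Int.mod v i ≠ 0) := by
      rw [checkOnePrime_eq_filter, List.filter_cons]
      simp [hmod]
    rw [hc] at ih ⊢
    rw [ih]
    simp

theorem foldB_eq (x : List Int) :
    ∀ kept, x.foldl
      (fun kept v =>
        if kept.all (fun p => PySem.Int.mod v p ≠ 0) then kept ++ [v] else kept) kept
      = kept ++ sieve (x.filter (fun v => kept.all (fun p => PySem.Int.mod v p ≠ 0))) := by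
  induction x with
  | nil => intro kept; simp [sieve]
  | cons v rest ih =>
    intro kept
    rw [List.foldl_cons, List.filter_cons]
    by_cases hb : (kept.all fun p => decide (PySem.Int.mod v p ≠ 0)) = true
    · rw [if_pos hb, if_pos hb, ih (kept ++ [v]), sieve]
      have hfil : rest.filter (fun w => (kept ++ [v]).all (fun p => PySem.Int.mod w p ≠ 0))
          = (rest.filter (fun w => kept.all (fun p => PySem.Int.mod w p ≠ 0))).filter
              (fun w => PySem.Int.mod w v ≠ 0) := by
        rw [List.filter_filter]
        apply List.filter_congr
        intro w _
        simp [List.all_append, Bool.and_comm]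
      rw [hfil]
      simp
    · rw [if_neg hb, if_neg hb, ih kept]
theorem alt_eq_sieve (x : List Int) : algoProcess_alt x = sieve x := by
  unfold algoProcess_alt
  rw [foldB_eq x []]
  simp

-- ===== VERDICT (by name: the statement is the Claim_ definition above) =====
theorem algoProcess_spec : Claim_equal_algoProcess := by
  intro x _ _
  unfold Spec_algoProcess algoProcess
  rw [algoProcessLoop_eq x [], alt_eq_sieve]
  simp
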